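-- pv_equiv track=rewrite | github.com/Spencatro/weeky_challenges | 7_cut_the_stick/py/cut_the_stick.py | cut_the_stick
-- ===== SOURCE A (Python) =====
-- def cut_the_stick(sticks):
--     stickt_dict = {}
--     start_count = len(sticks)
--     for stick in sticks:
--         if stick not in stickt_dict:
--             stickt_dict[stick] = 0
--         stickt_dict[stick] += 1
--     results = [start_count] if start_count else []
--     keys = list(stickt_dict.keys())
--     keys.sort()
--     for key in keys:
--         start_count -= stickt_dict[key]
--         if start_count:
--             results.append(start_count)
--     return results
-- ===== SOURCE B (Python) =====
-- def cut_the_stick(sticks):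
--     s = sorted(sticks)
--     n = len(s)
--     results = []
--     i = 0
--     while i < n:
--         results.append(n - i)
--         v = s[i]
--         while i < n and s[i] == v:
--             i += 1
--     return results
-- ===== Notes on version B (the rewrite author's own statement) =====
-- stated objective: simpler
-- what changed: Replaced the frequency-dict plus sorted-distinct-keys subtraction loop by a single sort followed by a run-length pointer scan that emits the count of remaining sticks at the start of each run of equal values.
import Mathlib
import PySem

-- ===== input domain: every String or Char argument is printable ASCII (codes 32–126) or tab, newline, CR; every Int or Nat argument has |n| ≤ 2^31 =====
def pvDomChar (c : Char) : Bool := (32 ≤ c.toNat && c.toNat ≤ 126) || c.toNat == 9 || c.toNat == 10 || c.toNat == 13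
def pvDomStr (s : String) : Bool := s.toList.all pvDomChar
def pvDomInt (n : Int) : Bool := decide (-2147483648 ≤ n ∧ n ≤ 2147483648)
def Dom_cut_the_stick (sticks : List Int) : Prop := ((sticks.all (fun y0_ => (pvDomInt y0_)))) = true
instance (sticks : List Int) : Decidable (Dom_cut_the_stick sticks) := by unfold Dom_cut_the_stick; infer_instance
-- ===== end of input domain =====

-- B replaces A's frequency dict + sorted distinct keys by one sort and a run-length pointer scan (simpler; same return value).

-- ===== PORT A =====
def cut_the_stick (sticks : List Int) : List Int :=
  let d := sticks.foldl
    (fun d stick =>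
      let d := if d.contains stick then d else d.insert stick (0 : Int)
      d.insert stick (d.getD stick 0 + 1))
    PySem.Dict.empty
  let start_count : Int := sticks.length
  let results : List Int := if start_count ≠ 0 then [start_count] else []
  let keys := PySem.List.sorted d.keys (fun x => x) false
  (keys.foldl
    (fun (p : Int × List Int) key =>
      let s := p.1 - d.getD key 0
      (s, if s ≠ 0 then p.2 ++ [s] else p.2))
    (start_count, results)).2

-- ===== PORT B =====
-- outer while loop of Source B: at each run start emit n - i, then the inner while
-- loop skips the run (dropWhile) and advances i by the run length
def cutAltAux (n : Int) (l : List Int) (i : Int) : List Int :=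
  match l with
  | [] => []
  | v :: rest =>
      let tail := rest.dropWhile (· == v)
      (n - i) :: cutAltAux n tail (i + 1 + ((rest.length : Int) - (tail.length : Int)))
termination_by l.length
decreasing_by
  simpa using Nat.lt_succ_of_le (List.length_dropWhile_le _ _)

def cut_the_stick_alt (sticks : List Int) : List Int :=
  cutAltAux sticks.length (PySem.List.sorted sticks (fun x => x) false) 0

-- ===== PRECONDITION & SPEC =====
def Spec_cut_the_stick (sticks : List Int) (out : List Int) : Prop := out = cut_the_stick_alt sticks
instance (sticks : List Int) (out : List Int) : Decidable (Spec_cut_the_stick sticks out) := by unfold Spec_cut_the_stick; infer_instance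

-- ===== CLAIM (what is proved, stated in full; the proofs are below) =====
def Claim_equal_cut_the_stick : Prop := ∀ (sticks : List Int), Dom_cut_the_stick sticks → Spec_cut_the_stick sticks (cut_the_stick sticks)

-- ===== LEMMAS AND PROOFS =====

-- helper: number of elements of l that are ≥ v (as Int) — both ports' outputs are maps of this
def tallyPV (l : List Int) (v : Int) : Int := (l.countP (fun x => decide (v ≤ x)) : Int)

-- run heads of a list (first element of each maximal run of equal adjacent values)
def runHeadsPV : List Int → List Int
  | [] => []
  | v :: rest => v :: runHeadsPV (rest.dropWhile (· == v))
termination_by l => l.length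
decreasing_by
  simpa using Nat.lt_succ_of_le (List.length_dropWhile_le _ _)

theorem mem_runHeadsPV : ∀ (t : List Int) (x : Int), x ∈ runHeadsPV t ↔ x ∈ t := by
  intro t
  induction t using runHeadsPV.induct with
  | case1 => simp [runHeadsPV]
  | case2 v rest ih =>
    intro x
    rw [runHeadsPV]
    simp only [List.mem_cons, ih]
    constructor
    · rintro (h | h)
      · exact Or.inl h
      · exact Or.inr ((List.dropWhile_sublist _).mem h)
    · rintro (h | h)
      · exact Or.inl h
      · rw [← List.takeWhile_append_dropWhile (p := (· == v)) (l := rest)] at h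
        rcases List.mem_append.mp h with h | h
        · exact Or.inl (by simpa using List.mem_takeWhile_imp h)
        · exact Or.inr h

theorem head_le_all (v : Int) (rest : List Int) (hp : (v :: rest).Pairwise (· ≤ ·)) :
    ∀ x ∈ v :: rest, v ≤ x := by
  intro x hx
  rcases List.mem_cons.mp hx with h | h
  · simp [h]
  · exact (List.pairwise_cons.mp hp).1 x h

theorem lt_of_mem_dropWhile (v : Int) : ∀ (rest : List Int), rest.Pairwise (· ≤ ·) →
    (∀ x ∈ rest, v ≤ x) → ∀ u ∈ rest.dropWhile (· == v), v < u := by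
  intro rest
  induction rest with
  | nil => simp
  | cons a rest ih =>
    intro hp hv
    by_cases h : a = v
    · rw [List.dropWhile_cons_of_pos (by simp [h])]
      exact ih (List.pairwise_cons.mp hp).2 (fun x hx => hv x (List.mem_cons_of_mem _ hx))
    · rw [List.dropWhile_cons_of_neg (by simp [h])]
      intro u hu
      have hva : v < a := lt_of_le_of_ne (hv a (by simp)) (fun e => h e.symm)
      rcases List.mem_cons.mp hu with rfl | hm
      · exact hva
      · have := (List.pairwise_cons.mp hp).1 u hm
        omega

theorem pairwise_lt_runHeadsPV : ∀ (t : List Int), t.Pairwise (· ≤ ·) →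
    (runHeadsPV t).Pairwise (· < ·) := by
  intro t
  induction t using runHeadsPV.induct with
  | case1 => simp [runHeadsPV]
  | case2 v rest ih =>
    intro hp
    rw [runHeadsPV]
    have hrest : rest.Pairwise (· ≤ ·) := (List.pairwise_cons.mp hp).2
    have htail : (rest.dropWhile (· == v)).Pairwise (· ≤ ·) :=
      hrest.sublist (List.dropWhile_sublist _)
    refine List.pairwise_cons.mpr ⟨?_, ih htail⟩
    intro u hu
    exact lt_of_mem_dropWhile v rest hrest (fun x hx => (List.pairwise_cons.mp hp).1 x hx) u
      ((mem_runHeadsPV _ u).mp hu)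

-- tally agrees between a sorted list and the suffix after dropping a run below u
theorem tally_drop_run (v u : Int) (rest : List Int) (hvu : v < u) :
    tallyPV (v :: rest) u = tallyPV (rest.dropWhile (· == v)) u := by
  unfold tallyPV
  conv_lhs => rw [← List.takeWhile_append_dropWhile (p := (· == v)) (l := rest)]
  rw [List.countP_cons, List.countP_append]
  have h1 : (rest.takeWhile (· == v)).countP (fun x => decide (u ≤ x)) = 0 := by
    rw [List.countP_eq_zero]
    intro a ha
    have : a = v := by simpa using List.mem_takeWhile_imp ha
    subst this
    simp
    omega
  have h2 : ¬ (u ≤ v) := not_le.mpr hvu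
  simp [h1, h2]

-- B's scan equals the map of tallies over run heads, on a sorted list
theorem cutAltAux_eq (n : Int) : ∀ (t : List Int) (i : Int), t.Pairwise (· ≤ ·) →
    i = n - (t.length : Int) → cutAltAux n t i = (runHeadsPV t).map (tallyPV t) := by
  intro t i
  induction t, i using cutAltAux.induct with
  | case1 i => intro _ _; simp [cutAltAux, runHeadsPV]
  | case2 i v rest tail ih =>
    intro hp hi
    rw [cutAltAux, runHeadsPV]
    have hrest : rest.Pairwise (· ≤ ·) := (List.pairwise_cons.mp hp).2
    have htail : (rest.dropWhile (· == v)).Pairwise (· ≤ ·) :=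
      hrest.sublist (List.dropWhile_sublist _)
    have hlen : (rest.dropWhile (· == v)).length ≤ rest.length := List.length_dropWhile_le _ _
    have ihe := ih htail (by
      simp only [List.length_cons] at hi
      push_cast at hi ⊢
      omega)
    rw [ihe]
    congr 1
    · -- head: n - i = tally of the head = full length
      have hall : ∀ x ∈ v :: rest, (fun x => decide (v ≤ x)) x = true := by
        intro x hx; simpa using head_le_all v rest hp x hx
      have htv : tallyPV (v :: rest) v = ((v :: rest).length : Int) := by
        unfold tallyPV; rw [List.countP_eq_length.mpr hall]
      rw [htv]
      simp only [List.length_cons] at hi ⊢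
      push_cast at hi ⊢
      omega
    · -- tail: tallies over the suffix agree with tallies over the whole list
      apply List.map_congr_left
      intro u hu
      have hut : u ∈ rest.dropWhile (· == v) := (mem_runHeadsPV _ u).mp hu
      have hvu : v < u := lt_of_mem_dropWhile v rest hrest
        (fun x hx => (List.pairwise_cons.mp hp).1 x hx) u hut
      rw [tally_drop_run v u rest hvu]

-- counting members of k :: ks splits off the count of k when k ∉ ks
theorem countP_cons_key (l : List Int) (k : Int) (ks : List Int) (hk : k ∉ ks) :
    l.countP (fun x => decide (x ∈ k :: ks)) = l.count k + l.countP (fun x => decide (x ∈ ks)) := by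
  induction l with
  | nil => simp
  | cons a l ih =>
    rw [List.countP_cons, List.countP_cons, List.count_cons, ih]
    by_cases h1 : a = k
    · subst h1
      simp [hk]
      omega
    · by_cases h2 : a ∈ ks
      · simp [h1, h2]
        omega
      · simp [h1, h2]

-- A's subtraction fold over strictly increasing keys appends the tallies of the tail keys
theorem foldA (sticks0 : List Int) : ∀ (ks acc : List Int),
    ks.Pairwise (· < ·) →
    (∀ k ∈ ks, k ∈ sticks0) →
    (∀ x ∈ sticks0, x ∈ ks ∨ ∀ k ∈ ks, x < k) →
    (ks.foldl (fun (p : Int × List Int) key =>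
        (p.1 - (sticks0.count key : Int),
         if p.1 - (sticks0.count key : Int) ≠ 0 then p.2 ++ [p.1 - (sticks0.count key : Int)]
         else p.2))
      ((sticks0.countP (fun x => decide (x ∈ ks)) : Int), acc)).2
    = acc ++ ks.tail.map (tallyPV sticks0) := by
  intro ks
  induction ks with
  | nil => intro acc _ _ _; simp
  | cons k ks ih =>
    intro acc hp hmem hcov
    have hknotin : k ∉ ks := fun h => lt_irrefl k ((List.pairwise_cons.mp hp).1 k h)
    have hs : ((sticks0.countP (fun x => decide (x ∈ k :: ks)) : Int)) - (sticks0.count k : Int)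
        = (sticks0.countP (fun x => decide (x ∈ ks)) : Int) := by
      rw [countP_cons_key sticks0 k ks hknotin]; push_cast; ring
    have hcov' : ∀ x ∈ sticks0, x ∈ ks ∨ ∀ j ∈ ks, x < j := by
      intro x hx
      rcases hcov x hx with h | h
      · rcases List.mem_cons.mp h with h | h
        · subst h; exact Or.inr (fun j hj => (List.pairwise_cons.mp hp).1 j hj)
        · exact Or.inl h
      · exact Or.inr (fun j hj => h j (List.mem_cons_of_mem _ hj))
    rw [List.foldl_cons, hs]
    cases ks with
    | nil =>
      have h0 : ((sticks0.countP (fun x => decide (x ∈ ([] : List Int))) : Int)) = 0 := by simp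
      rw [h0]
      simp
    | cons k' ks' =>
      have hk' : k' ∈ sticks0 := hmem k' (by simp)
      have hpos : 0 < sticks0.countP (fun x => decide (x ∈ k' :: ks')) :=
        List.countP_pos_iff.mpr ⟨k', hk', by simp⟩
      have hne : ((sticks0.countP (fun x => decide (x ∈ k' :: ks')) : Int)) ≠ 0 :=
        Int.natCast_ne_zero.mpr hpos.ne'
      rw [if_pos hne]
      rw [ih (acc ++ [(sticks0.countP (fun x => decide (x ∈ k' :: ks')) : Int)])
        (List.pairwise_cons.mp hp).2 (fun j hj => hmem j (List.mem_cons_of_mem _ hj)) hcov']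
      have htal : ((sticks0.countP (fun x => decide (x ∈ k' :: ks')) : Int))
          = tallyPV sticks0 k' := by
        unfold tallyPV
        congr 1
        apply List.countP_congr
        intro x hx
        simp only [decide_eq_true_eq]
        constructor
        · intro h
          rcases List.mem_cons.mp h with h | h
          · omega
          · exact le_of_lt ((List.pairwise_cons.mp (List.pairwise_cons.mp hp).2).1 x h)
        · intro h
          rcases hcov' x hx with hin | hlt
          · exact hin
          · exact absurd h (not_le.mpr (hlt k' (by simp)))
      rw [htal]
      simp

-- the sorted distinct keys of sticks
def sortedKeysPV (sticks : List Int) : List Int :=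
  PySem.List.sorted (PySem.Set.ofList sticks) (fun x => x) false

theorem sortedKeysPV_def (sticks : List Int) :
    PySem.List.sorted (PySem.Set.ofList sticks) (fun x => x) false = sortedKeysPV sticks := rfl

theorem mem_sortedKeysPV (sticks : List Int) (x : Int) :
    x ∈ sortedKeysPV sticks ↔ x ∈ sticks := by
  unfold sortedKeysPV
  rw [PySem.List.mem_sorted, PySem.Set.mem_ofList]

-- the dict-building loop body of port A agrees with the plain counter insert step
theorem dictStep_eq (d : PySem.Dict Int Int) (k : Int) :
    (let d' := if d.contains k then d else d.insert k (0 : Int)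
     d'.insert k (d'.getD k 0 + 1)) = d.insert k (d.getD k 0 + 1) := by
  by_cases h : d.contains k
  · simp [h]
  · simp only [h, Bool.false_eq_true, if_false]
    rw [PySem.Dict.getD_insert_self, PySem.Dict.insert_insert_self,
      PySem.Dict.getD_of_not_contains d 0 (by simpa using h)]

-- port A equals the map of tallies over the sorted distinct keys
theorem A_eq (sticks : List Int) :
    cut_the_stick sticks = (sortedKeysPV sticks).map (tallyPV sticks) := by
  have hd : sticks.foldl
      (fun d stick =>
        let d := if d.contains stick then d else d.insert stick (0 : Int)
        d.insert stick (d.getD stick 0 + 1))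
      PySem.Dict.empty = PySem.Dict.counter sticks := by
    rw [show (fun (d : PySem.Dict Int Int) stick =>
        let d := if d.contains stick then d else d.insert stick (0 : Int)
        d.insert stick (d.getD stick 0 + 1))
      = (fun (d : PySem.Dict Int Int) stick => d.insert stick (d.getD stick 0 + 1)) from
        funext fun d => funext fun k => dictStep_eq d k]
    exact PySem.Dict.foldl_insert_getD_add_one_eq_counter sticks
  unfold cut_the_stick
  rw [hd]
  simp only [PySem.Dict.keys_counter, PySem.Dict.getD_counter, sortedKeysPV_def]
  cases hst : sticks with
  | nil => simp [sortedKeysPV, PySem.Set.ofList, PySem.List.sorted]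
  | cons a l =>
    rw [← hst]
    have hplt : (sortedKeysPV sticks).Pairwise (· < ·) := by
      rw [← sortedKeysPV_def]
      exact PySem.List.sorted_ofList_pairwise_lt sticks
    have hcovAll : ∀ x ∈ sticks, x ∈ sortedKeysPV sticks := by
      intro x hx; exact (mem_sortedKeysPV sticks x).mpr hx
    have hn : ((sticks.length : Int)) = (sticks.countP (fun x => decide (x ∈ sortedKeysPV sticks)) : Int) := by
      rw [List.countP_eq_length.mpr (fun x hx => by simpa using hcovAll x hx)]
    have hnne : ((sticks.length : Int)) ≠ 0 := by
      rw [hst]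
      simp only [List.length_cons]
      push_cast
      omega
    rw [if_pos hnne, hn]
    rw [foldA sticks (sortedKeysPV sticks)
      [(sticks.countP (fun x => decide (x ∈ sortedKeysPV sticks)) : Int)]
      hplt (fun k hk => (mem_sortedKeysPV sticks k).mp hk)
      (fun x hx => Or.inl (hcovAll x hx))]
    cases hk : sortedKeysPV sticks with
    | nil =>
      exfalso
      have : a ∈ sortedKeysPV sticks := hcovAll a (by simp [hst])
      simp [hk] at this
    | cons k1 ks =>
      have htal1 : (sticks.countP (fun x => decide (x ∈ k1 :: ks)) : Int)
          = tallyPV sticks k1 := by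
        unfold tallyPV
        congr 1
        apply List.countP_congr
        intro x hx
        simp only [decide_eq_true_eq]
        constructor
        · intro _
          have hxk : x ∈ k1 :: ks := by rw [← hk]; exact hcovAll x hx
          rcases List.mem_cons.mp hxk with h | h
          · omega
          · have := (List.pairwise_cons.mp (hk ▸ hplt)).1 x h
            omega
        · intro _; exact hk ▸ hcovAll x hx
      rw [htal1]
      simp

-- port B equals the same map
theorem B_eq (sticks : List Int) :
    cut_the_stick_alt sticks = (sortedKeysPV sticks).map (tallyPV sticks) := by
  unfold cut_the_stick_alt
  set s := PySem.List.sorted sticks (fun x => x) false with hs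
  have hperm : s.Perm sticks := PySem.List.sorted_perm sticks (fun x => x) false
  have hsorted : s.Pairwise (· ≤ ·) := by
    have := PySem.List.sorted_pairwise sticks (fun x => x)
    simpa [← hs] using this
  have hlen : (0 : Int) = (sticks.length : Int) - (s.length : Int) := by
    rw [hperm.length_eq]
    ring
  rw [cutAltAux_eq (sticks.length : Int) s 0 hsorted hlen]
  have hkeys : runHeadsPV s = sortedKeysPV sticks := by
    unfold sortedKeysPV
    refine (PySem.List.sorted_eq_of_perm_of_pairwise_lt _ _ _ ?_ ?_).symm
    · apply (List.perm_ext_iff_of_nodup ?_ ?_).mpr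
      · intro x
        rw [mem_runHeadsPV, PySem.Set.mem_ofList]
        exact ⟨fun h => hperm.mem_iff.mp h, fun h => hperm.mem_iff.mpr h⟩
      · exact (pairwise_lt_runHeadsPV s hsorted).imp (fun h => ne_of_lt h)
      · exact PySem.Set.nodup_ofList sticks
    · simpa using pairwise_lt_runHeadsPV s hsorted
  rw [hkeys]
  apply List.map_congr_left
  intro u _
  unfold tallyPV
  rw [hperm.countP_eq]

-- ===== VERDICT (by name: the statement is the Claim_ definition above) =====
theorem cut_the_stick_spec : Claim_equal_cut_the_stick := by
  intro sticks _
  unfold Spec_cut_the_stick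
  rw [A_eq, B_eq]
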